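-- pv_equiv track=rewrite | github.com/shevdan/programming-group-209 | number_type.py | sieve_flavius
-- ===== SOURCE A (Python) =====
-- def sieve_flavius(number: int) -> list:
--     '''
--     Function generates list similar to Erathosphen sieve
--     for building lucky numbers sequence
--     >>> sieve_flavius(100)
--     [1, 3, 7, 9, 13, 15, 21, 25, 31, 33, 37, 43, 49, 51, 63, 67, 69, 73, 75, 79, 87, 93, 99]
--     >>> sieve_flavius(10)
--     [1, 3, 7, 9]
--     >>> sieve_flavius(0)
--     []
--     '''
--     flavius_list = list(range(1, number + 1, 2))
--     id_list = 1
--     while id_list < len(flavius_list):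
--         temporary_list = []
--         num = flavius_list[id_list]
--         for index, item in enumerate(flavius_list):
--             if (index + 1) % num != 0:
--                 temporary_list.append(item)
--         flavius_list = temporary_list
--         id_list += 1
--     return flavius_list
-- ===== SOURCE B (Python) =====
-- def _nth_alive(vals, alive, k):
--     seen = 0
--     for i in range(len(vals)):
--         if alive[i]:
--             if seen == k:
--                 return vals[i]
--             seen += 1
--     return 0  # unreachable: callers guarantee k < number of alive entries
--
--
-- def sieve_flavius(number: int) -> list:
--     """Lucky-number sieve by in-place marking: instead of rebuilding the list
--     each round, keep an alive-flag array, kill every num-th survivor in place,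
--     track the survivor count arithmetically, and stop as soon as the current
--     sieve value exceeds the survivor count (all later rounds delete nothing)."""
--     vals = list(range(1, number + 1, 2))
--     alive = [True] * len(vals)
--     count = len(vals)
--     k = 1
--     while k < count:
--         num = _nth_alive(vals, alive, k)
--         if num > count:
--             break
--         seen = 0
--         for i in range(len(vals)):
--             if alive[i]:
--                 seen += 1
--                 if seen % num == 0:
--                     alive[i] = False
--         count -= count // num
--         k += 1
--     return [v for v, a in zip(vals, alive) if a]
-- ===== Notes on version B (the rewrite author's own statement) =====
-- stated objective: alternative
-- what changed: Instead of rebuilding the survivor list every round, B marks survivors dead in an alive-flag array, tracks the survivor count arithmetically (count -= count // num), and stops the sieve as soon as the current sieve value exceeds the survivor count, since every later round of A provably deletes nothing.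
import Mathlib
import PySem

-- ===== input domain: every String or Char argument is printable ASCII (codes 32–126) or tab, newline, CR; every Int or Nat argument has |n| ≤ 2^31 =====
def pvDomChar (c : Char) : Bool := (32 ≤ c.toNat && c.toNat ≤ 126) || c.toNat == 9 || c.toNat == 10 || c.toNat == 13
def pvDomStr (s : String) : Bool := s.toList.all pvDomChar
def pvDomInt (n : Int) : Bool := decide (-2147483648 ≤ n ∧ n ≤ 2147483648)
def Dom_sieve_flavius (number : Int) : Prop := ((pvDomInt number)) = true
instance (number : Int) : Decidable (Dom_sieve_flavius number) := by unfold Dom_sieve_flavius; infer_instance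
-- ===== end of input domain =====

-- B replaces A's rebuild-the-list-every-round sieve by in-place alive-marking with an
-- arithmetically tracked survivor count and an early exit once the sieve value exceeds
-- the survivor count (all later rounds of A provably delete nothing).

-- ===== PORT A =====
-- inner 'for index, item in enumerate(flavius_list): if (index+1) % num != 0: append'
def pvFilterA (num : Int) : Nat → List Int → List Int
  | _, [] => []
  | c, x :: xs =>
    if ((c : Int) + 1) % num ≠ 0 then x :: pvFilterA num (c + 1) xs
    else pvFilterA num (c + 1) xs

theorem pvFilterA_sublist (num : Int) : ∀ (c : Nat) (l : List Int), (pvFilterA num c l).Sublist l := by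
  intro c l
  induction l generalizing c with
  | nil => simp [pvFilterA]
  | cons x xs ih =>
    simp only [pvFilterA]
    split
    · exact List.Sublist.cons₂ x (ih (c + 1))
    · exact List.Sublist.cons x (ih (c + 1))

theorem pvFilterA_length_le (num : Int) (c : Nat) (l : List Int) :
    (pvFilterA num c l).length ≤ l.length :=
  (pvFilterA_sublist num c l).length_le

-- 'while id_list < len(flavius_list): …'
def pvLoopA (lst : List Int) (k : Nat) : List Int :=
  if h : k < lst.length then
    pvLoopA (pvFilterA (lst.getD k 0) 0 lst) (k + 1)
  else lst
termination_by lst.length - k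
decreasing_by
  have := pvFilterA_length_le (lst.getD k 0) 0 lst
  omega

def sieve_flavius (number : Int) : List Int :=
  pvLoopA (PySem.List.pyRange 1 (number + 1) 2) 1

-- ===== PORT B =====
-- B's parallel lists vals/alive are ported as one list of (value, alive) pairs.
-- '_nth_alive(vals, alive, k)': scan with a seen-counter
def pvNthAlive (k : Nat) : Nat → List (Int × Bool) → Int
  | _, [] => 0  -- unreachable fallthrough, as in Source B
  | seen, (v, a) :: xs =>
    if a then (if seen = k then v else pvNthAlive k (seen + 1) xs)
    else pvNthAlive k seen xs

-- the kill scan: 'if alive[i]: seen += 1; if seen % num == 0: alive[i] = False'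
def pvMark (num : Int) : Nat → List (Int × Bool) → List (Int × Bool)
  | _, [] => []
  | seen, (v, a) :: xs =>
    if a then
      if ((seen : Int) + 1) % num = 0 then (v, false) :: pvMark num (seen + 1) xs
      else (v, true) :: pvMark num (seen + 1) xs
    else (v, a) :: pvMark num seen xs

-- 'while k < count: … if num > count: break …'
def pvLoopB (state : List (Int × Bool)) (count k : Nat) : List (Int × Bool) :=
  if k < count then
    if (count : Int) < pvNthAlive k 0 state then state
    else pvLoopB (pvMark (pvNthAlive k 0 state) 0 state)
          (count - count / (pvNthAlive k 0 state).toNat) (k + 1)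
  else state
termination_by count - k
decreasing_by
  have : count - count / (pvNthAlive k 0 state).toNat ≤ count := Nat.sub_le _ _
  omega

def sieve_flavius_alt (number : Int) : List Int :=
  let vals := PySem.List.pyRange 1 (number + 1) 2
  let state := vals.map (fun v => (v, true))
  (pvLoopB state vals.length 1).filterMap (fun p => if p.2 then some p.1 else none)

-- ===== PRECONDITION & SPEC =====
def Spec_sieve_flavius (number : Int) (out : List Int) : Prop := out = sieve_flavius_alt number
instance (number : Int) (out : List Int) : Decidable (Spec_sieve_flavius number out) := by unfold Spec_sieve_flavius; infer_instance

-- ===== CLAIM (what is proved, stated in full; the proofs are below) =====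
def Claim_equal_sieve_flavius : Prop := ∀ (number : Int), Dom_sieve_flavius number → Spec_sieve_flavius number (sieve_flavius number)

-- ===== LEMMAS AND PROOFS =====

-- the survivors of B's marked state, in order
def pvCompact (s : List (Int × Bool)) : List Int :=
  s.filterMap (fun p => if p.2 then some p.1 else none)

theorem pvCompact_cons_true (v : Int) (xs : List (Int × Bool)) :
    pvCompact ((v, true) :: xs) = v :: pvCompact xs := by
  simp [pvCompact]

theorem pvCompact_cons_false (v : Int) (xs : List (Int × Bool)) :
    pvCompact ((v, false) :: xs) = pvCompact xs := by
  simp [pvCompact]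

-- L1: one kill scan of B corresponds to one filter round of A on the survivors
theorem pvCompact_mark (num : Int) :
    ∀ (s : List (Int × Bool)) (c : Nat),
      pvCompact (pvMark num c s) = pvFilterA num c (pvCompact s) := by
  intro s
  induction s with
  | nil => intro c; simp [pvMark, pvCompact, pvFilterA]
  | cons p xs ih =>
    intro c
    obtain ⟨v, a⟩ := p
    cases a with
    | false => simp [pvMark, pvCompact_cons_false, ih]
    | true =>
      simp only [pvMark, if_true]
      by_cases h : ((c : Int) + 1) % num = 0
      · simp [h, pvCompact_cons_false, pvCompact_cons_true, pvFilterA, ih]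
      · simp [h, pvCompact_cons_true, pvFilterA, ih]

-- L2: the nth-alive scan reads the survivors list
theorem pvNthAlive_eq (k : Nat) :
    ∀ (s : List (Int × Bool)) (seen : Nat), seen ≤ k →
      pvNthAlive k seen s = (pvCompact s).getD (k - seen) 0 := by
  intro s
  induction s with
  | nil => intro seen _; simp [pvNthAlive, pvCompact]
  | cons p xs ih =>
    intro seen hle
    obtain ⟨v, a⟩ := p
    cases a with
    | false => simp [pvNthAlive, pvCompact_cons_false, ih seen hle]
    | true =>
      simp only [pvNthAlive, if_true]
      by_cases h : seen = k
      · simp [h, pvCompact_cons_true]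
      · have h1 : seen + 1 ≤ k := by omega
        rw [if_neg h, ih (seen + 1) h1, pvCompact_cons_true]
        have : k - seen = (k - (seen + 1)) + 1 := by omega
        rw [this]
        rfl

-- L3: length of a filter round (num = n > 0): len - len/n
theorem pvFilterA_length (n : Nat) (_hn : 0 < n) :
    ∀ (l : List Int) (c : Nat),
      (pvFilterA (n : Int) c l).length + (c + l.length) / n = l.length + c / n := by
  intro l
  induction l with
  | nil => intro c; simp [pvFilterA]
  | cons x xs ih =>
    intro c
    have hcast : (((c : Int)) + 1) % (n : Int) = (((c + 1) % n : Nat) : Int) := by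
      push_cast; rfl
    have hih := ih (c + 1)
    by_cases h : (c + 1) % n = 0
    · have hz : ((c : Int) + 1) % (n : Int) = 0 := by rw [hcast]; exact_mod_cast h
      have hdvd : n ∣ c + 1 := (Nat.dvd_iff_mod_eq_zero).mpr h
      have hsucc : (c + 1) / n = c / n + 1 := by
        rw [Nat.succ_div, if_pos hdvd]
      simp only [pvFilterA, hz, ne_eq, not_true_eq_false, if_false, List.length_cons]
      rw [show c + (xs.length + 1) = (c + 1) + xs.length from by omega]
      omega
    · have hz : ¬ ((c : Int) + 1) % (n : Int) = 0 := by
        rw [hcast]; intro hh; exact h (by exact_mod_cast hh)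
      have hdvd : ¬ n ∣ c + 1 := fun hd => h ((Nat.dvd_iff_mod_eq_zero).mp hd)
      have hsucc : (c + 1) / n = c / n := by
        rw [Nat.succ_div, if_neg hdvd]
        omega
      simp only [pvFilterA, ne_eq, hz, not_false_eq_true, if_true, List.length_cons]
      rw [show c + (xs.length + 1) = (c + 1) + xs.length from by omega]
      omega

theorem pvFilterA_length_zero (n : Nat) (hn : 0 < n) (l : List Int) :
    (pvFilterA (n : Int) 0 l).length = l.length - l.length / n := by
  have := pvFilterA_length n hn l 0
  simp at this
  omega

-- filter with num greater than the remaining positions is the identity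
theorem pvFilterA_id (num : Int) :
    ∀ (l : List Int) (c : Nat), ((c : Int) + l.length) < num → pvFilterA num c l = l := by
  intro l
  induction l with
  | nil => intro c _; rfl
  | cons x xs ih =>
    intro c hlt
    simp only [List.length_cons] at hlt
    have h1 : ((c : Int) + 1) % num = (c : Int) + 1 := by
      apply Int.emod_eq_of_lt
      · omega
      · push_cast at hlt ⊢; omega
    have h2 : ((c : Int) + 1) % num ≠ 0 := by rw [h1]; omega
    simp only [pvFilterA, ne_eq, h2, not_false_eq_true, if_true]
    rw [ih (c + 1)]
    push_cast at hlt ⊢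
    omega

-- once lst[k] exceeds len(lst), every remaining round of A is a no-op
theorem pvLoopA_id (L : List Int) (k : Nat)
    (hsort : L.Pairwise (· ≤ ·)) (hk : k < L.length) (hbig : (L.length : Int) < L.getD k 0) :
    pvLoopA L k = L := by
  induction hm : L.length - k using Nat.strong_induction_on generalizing k with
  | _ m ih =>
    rw [pvLoopA, dif_pos hk, pvFilterA_id _ _ _ (by simpa using hbig)]
    by_cases hk1 : k + 1 < L.length
    · have hle : L.getD k 0 ≤ L.getD (k + 1) 0 := by
        rw [List.getD_eq_getElem _ _ hk, List.getD_eq_getElem _ _ hk1]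
        exact List.pairwise_iff_getElem.mp hsort k (k+1) hk hk1 (by omega)
      exact ih (L.length - (k + 1)) (by omega) (k + 1) hk1 (lt_of_lt_of_le hbig hle) rfl
    · rw [pvLoopA, dif_neg hk1]

-- the main bisimulation: A's loop on the survivors list = B's loop on the marked state
theorem pvLoop_bisim (s : List (Int × Bool)) (k : Nat)
    (hsort : (pvCompact s).Pairwise (· ≤ ·)) (hpos : ∀ x ∈ pvCompact s, 0 < x) :
    pvLoopA (pvCompact s) k = pvCompact (pvLoopB s (pvCompact s).length k) := by
  induction hm : (pvCompact s).length - k using Nat.strong_induction_on generalizing s k with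
  | _ m ih =>
    by_cases hk : k < (pvCompact s).length
    · have hnum : pvNthAlive k 0 s = (pvCompact s).getD k 0 := by
        simpa using pvNthAlive_eq k s 0 (Nat.zero_le k)
      rw [pvLoopB.eq_def, if_pos hk]
      simp only [hnum]
      by_cases hbig : ((pvCompact s).length : Int) < (pvCompact s).getD k 0
      · rw [if_pos hbig]
        exact pvLoopA_id _ k hsort hk hbig
      · rw [if_neg hbig]
        set num := (pvCompact s).getD k 0 with hnumdef
        have hmem : num ∈ pvCompact s := by
          rw [hnumdef, List.getD_eq_getElem _ _ hk]
          exact List.getElem_mem hk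
        have hnpos : 0 < num := hpos num hmem
        have hnnat : num = ((num.toNat : Nat) : Int) := by omega
        have hlen : (pvFilterA num 0 (pvCompact s)).length
            = (pvCompact s).length - (pvCompact s).length / num.toNat := by
          have h0 := pvFilterA_length_zero num.toNat (by omega) (pvCompact s)
          rw [← hnnat] at h0
          exact h0
        rw [pvLoopA, dif_pos hk]
        have hsub : (pvFilterA num 0 (pvCompact s)).Sublist (pvCompact s) :=
          pvFilterA_sublist num 0 (pvCompact s)
        have hrec := ih ((pvCompact (pvMark num 0 s)).length - (k + 1))
          (by
            have : (pvCompact (pvMark num 0 s)).length ≤ (pvCompact s).length := by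
              rw [pvCompact_mark]; exact (pvFilterA_sublist _ _ _).length_le
            omega)
          (pvMark num 0 s) (k + 1)
          (by rw [pvCompact_mark]; exact List.Pairwise.sublist hsub hsort)
          (by rw [pvCompact_mark]; exact fun x hx => hpos x (hsub.mem hx))
          rfl
        rw [pvCompact_mark] at hrec
        rw [hrec, hlen]
    · rw [pvLoopA, dif_neg hk, pvLoopB.eq_def, if_neg hk]

theorem pvCompact_init (vals : List Int) :
    pvCompact (vals.map (fun v => (v, true))) = vals := by
  induction vals with
  | nil => rfl
  | cons x xs ih => simp [pvCompact_cons_true, ih]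

theorem pvOdds_sorted (number : Int) : (PySem.List.pyRange 1 (number + 1) 2).Pairwise (· ≤ ·) := by
  rw [PySem.List.pyRange_of_pos 1 (number + 1) (by norm_num)]
  apply List.Pairwise.map
  · intro a b hab
    omega
  · exact (List.pairwise_lt_range).imp (by omega)

theorem pvOdds_pos (number : Int) : ∀ x ∈ PySem.List.pyRange 1 (number + 1) 2, 0 < x := by
  intro x hx
  have := (PySem.List.mem_pyRange_iff_of_pos (a := 1) (b := number + 1) (s := 2) (by norm_num) x).mp hx
  omega

-- ===== VERDICT (by name: the statement is the Claim_ definition above) =====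
theorem sieve_flavius_spec : Claim_equal_sieve_flavius := by
  intro number _
  unfold Spec_sieve_flavius sieve_flavius sieve_flavius_alt
  set vals := PySem.List.pyRange 1 (number + 1) 2 with hvals
  have hinit := pvCompact_init vals
  have hbis := pvLoop_bisim (vals.map (fun v => (v, true))) 1
    (by rw [hinit]; exact pvOdds_sorted number)
    (by rw [hinit]; exact pvOdds_pos number)
  rw [hinit] at hbis
  have hlen : vals.length = (vals.map (fun v => (v, true))).length := by simp
  rw [show (pvLoopB (vals.map fun v => (v, true)) vals.length 1).filterMap
        (fun p => if p.2 then some p.1 else none)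
      = pvCompact (pvLoopB (vals.map fun v => (v, true)) vals.length 1) from rfl]
  rw [← hbis]
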